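-- pv_equiv track=rewrite | github.com/gabrielkordzadze/GOA | day 98/homework/homework.py | estimator
-- ===== SOURCE A (Python) =====
-- def estimator(s,o):
--     i=0
--     while i<len(s):
--         if s[i]==1:
--             a=0
--             while i+a<len(s) and s[i+a]==1:
--                 a+=1
--             if a==1:
--                 o-=2
--             elif a==2:
--                 o-=5
--             elif a==3:
--                 o-=10
--             if o<0:
--                 return False
--             i+=a
--         else:
--             i+=1
--     return True
-- ===== SOURCE B (Python) =====
-- def estimator(s, o):
--     # Run-length encode the whole sequence in one pass, then fold the
--     # penalties over the runs of 1s with an early exit.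
--     runs = []
--     for x in s:
--         if runs and runs[-1][0] == x:
--             runs[-1][1] += 1
--         else:
--             runs.append([x, 1])
--     for v, n in runs:
--         if v == 1:
--             o -= {1: 2, 2: 5, 3: 10}.get(n, 0)
--             if o < 0:
--                 return False
--     return True
-- ===== Notes on version B (the rewrite author's own statement) =====
-- stated objective: simpler
-- what changed: Replaces the index-driven nested while loops by a run-length encoding pass followed by a flat fold over the runs of 1s.
import Mathlib
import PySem

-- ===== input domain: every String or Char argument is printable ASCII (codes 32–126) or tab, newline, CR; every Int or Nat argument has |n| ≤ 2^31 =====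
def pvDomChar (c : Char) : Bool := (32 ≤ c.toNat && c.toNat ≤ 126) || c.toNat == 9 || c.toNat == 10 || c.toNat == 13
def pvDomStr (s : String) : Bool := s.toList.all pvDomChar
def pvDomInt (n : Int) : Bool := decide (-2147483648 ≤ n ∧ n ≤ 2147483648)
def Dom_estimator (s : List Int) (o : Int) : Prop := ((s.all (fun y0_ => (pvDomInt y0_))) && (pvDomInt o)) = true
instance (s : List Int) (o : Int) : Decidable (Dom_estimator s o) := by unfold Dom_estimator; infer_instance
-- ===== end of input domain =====

-- B replaces A's index-driven nested while loops by a run-length encoding pass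
-- followed by a flat fold over the runs of 1s (objective: simpler).

-- ===== PORT A =====
-- inner while loop of A: count of leading 1s of the suffix starting at i
def countLead : List Int → Nat
  | [] => 0
  | x :: xs => if x = 1 then countLead xs + 1 else 0

def estimator (s : List Int) (o : Int) : Bool :=
  match s with
  | [] => true
  | x :: xs =>
    if h : x = 1 then
      let a := countLead (x :: xs)
      let o' := if a = 1 then o - 2 else if a = 2 then o - 5 else if a = 3 then o - 10 else o
      if o' < 0 then false
      else estimator ((x :: xs).drop a) o'
    else estimator xs o
termination_by s.length
decreasing_by
· have ha : countLead (x :: xs) = countLead xs + 1 := by simp [countLead, h]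
  simp [ha]
· simp

-- ===== PORT B =====
-- first loop of Source B: extend the last run or start a new one
-- (runs are kept most-recent-first and reversed at the end)
def pushRun (runs : List (Int × Nat)) (x : Int) : List (Int × Nat) :=
  match runs with
  | (y, n) :: rest => if y = x then (y, n + 1) :: rest else (x, 1) :: (y, n) :: rest
  | [] => [(x, 1)]

def runsOf (s : List Int) : List (Int × Nat) := (s.foldl pushRun []).reverse

-- second loop of Source B; the literal dict {1:2,2:5,3:10}.get(n,0) is the if-chain
def goB : List (Int × Nat) → Int → Bool
  | [], _ => true
  | (v, n) :: rest, o =>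
    if v = 1 then
      let o' := o - (if n = 1 then 2 else if n = 2 then 5 else if n = 3 then 10 else 0)
      if o' < 0 then false else goB rest o'
    else goB rest o

def estimator_alt (s : List Int) (o : Int) : Bool := goB (runsOf s) o

-- ===== PRECONDITION & SPEC =====
def Spec_estimator (s : List Int) (o : Int) (out : Bool) : Prop := out = estimator_alt s o
instance (s : List Int) (o : Int) (out : Bool) : Decidable (Spec_estimator s o out) := by unfold Spec_estimator; infer_instance

-- ===== CLAIM (what is proved, stated in full; the proofs are below) =====
def Claim_equal_estimator : Prop := ∀ (s : List Int) (o : Int), Dom_estimator s o → Spec_estimator s o (estimator s o)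

-- ===== LEMMAS AND PROOFS =====

-- right-recursive run-length encoding (proof device)
def rle : List Int → List (Int × Nat)
  | [] => []
  | x :: xs =>
    match rle xs with
    | (y, n) :: r => if y = x then (y, n + 1) :: r else (x, 1) :: (y, n) :: r
    | [] => [(x, 1)]

-- boundary merge of a reversed accumulator with an rle tail
def glue (acc b : List (Int × Nat)) : List (Int × Nat) :=
  match acc, b with
  | (y, n) :: rest, (z, m) :: b' =>
      if z = y then rest.reverse ++ (y, n + m) :: b' else acc.reverse ++ b
  | _, _ => acc.reverse ++ b

theorem foldl_pushRun_glue (s : List Int) (acc : List (Int × Nat)) :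
    (s.foldl pushRun acc).reverse = glue acc (rle s) := by
  induction s generalizing acc with
  | nil =>
    cases acc with
    | nil => simp [glue, rle]
    | cons p rest => cases p; simp [glue, rle]
  | cons x xs ih =>
    rw [List.foldl_cons, ih]
    cases acc with
    | nil =>
      simp only [pushRun, rle]
      cases hx : rle xs with
      | nil => simp [glue]
      | cons p b' =>
        cases p with
        | mk z m =>
          by_cases hz : z = x
          · subst hz; simp [glue, Nat.add_comm]
          · simp [glue, hz]
    | cons p rest =>
      cases p with
      | mk y n =>
        simp only [pushRun]
        by_cases hy : y = x
        · subst hy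
          simp only [rle]
          cases hx : rle xs with
          | nil => simp [glue]
          | cons q b' =>
            cases q with
            | mk z m =>
              by_cases hz : z = y
              · subst hz; simp [glue]; ring_nf
              · simp [glue, hz]
        · simp only [if_neg hy, rle]
          cases hx : rle xs with
          | nil => simp [glue, Ne.symm hy]
          | cons q b' =>
            cases q with
            | mk z m =>
              by_cases hz : z = x
              · subst hz; simp [glue, Ne.symm hy, Nat.add_comm]
              · simp [glue, hz, Ne.symm hy]

theorem runsOf_eq_rle (s : List Int) : runsOf s = rle s := by
  unfold runsOf
  rw [foldl_pushRun_glue]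
  cases h : rle s with
  | nil => simp [glue]
  | cons p b => cases p; simp [glue]

-- head of rle (x::xs) carries x
theorem rle_head (x : Int) (xs : List Int) :
    ∃ n r, rle (x :: xs) = (x, n) :: r := by
  simp only [rle]
  cases rle xs with
  | nil => exact ⟨1, [], rfl⟩
  | cons p r =>
    cases p with
    | mk y n =>
      by_cases hy : y = x
      · subst hy; exact ⟨n + 1, r, by simp⟩
      · exact ⟨1, (y, n) :: r, by simp [hy]⟩

theorem rle_lead_ones (xs : List Int) :
    rle (1 :: xs) = (1, countLead xs + 1) :: rle (xs.drop (countLead xs)) := by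
  induction xs with
  | nil => simp [rle, countLead]
  | cons w ws ih =>
    by_cases hw : w = 1
    · subst hw
      have hc : countLead ((1 : Int) :: ws) = countLead ws + 1 := by simp [countLead]
      rw [hc]
      conv_lhs => rw [rle]
      rw [ih]
      simp
    · have hc : countLead (w :: ws) = 0 := by simp [countLead, hw]
      rw [hc]
      obtain ⟨n, r, hr⟩ := rle_head w ws
      conv_lhs => rw [rle]
      rw [hr]
      simp [hw, ← hr]

theorem goA_eq_goB_rle (s : List Int) (o : Int) :
    estimator s o = goB (rle s) o := by
  induction hn : s.length using Nat.strong_induction_on generalizing s o with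
  | _ n ih =>
  subst hn
  match s with
  | [] => simp [estimator, rle, goB]
  | x :: xs =>
    by_cases hx : x = 1
    · subst hx
      rw [estimator]
      rw [rle_lead_ones xs]
      have hc : countLead ((1 : Int) :: xs) = countLead xs + 1 := by simp [countLead]
      rw [hc]
      set a := countLead xs + 1 with ha
      simp only [goB]
      have hpen : (if a = 1 then o - 2 else if a = 2 then o - 5 else if a = 3 then o - 10 else o)
          = o - (if a = 1 then 2 else if a = 2 then 5 else if a = 3 then 10 else 0) := by
        split_ifs <;> simp
      rw [hpen]
      set o' := o - (if a = 1 then 2 else if a = 2 then 5 else if a = 3 then 10 else 0) with ho'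
      by_cases hneg : o' < 0
      · simp [hneg]
      · simp only [if_neg hneg]
        rw [ha]
        simp only [List.drop_succ_cons]
        exact ih (xs.drop (countLead xs)).length (by simp) _ o' rfl
    · rw [estimator]
      simp only [dif_neg hx]
      rw [ih xs.length (by simp) xs o rfl]
      simp only [rle]
      cases hxr : rle xs with
      | nil => simp [goB, hx]
      | cons p r =>
        cases p with
        | mk z m =>
          by_cases hz : z = x
          · subst hz; simp [goB, hx]
          · simp [goB, hx, hz]

-- ===== VERDICT (by name: the statement is the Claim_ definition above) =====
theorem estimator_spec : Claim_equal_estimator := by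
  intro s o _
  unfold Spec_estimator estimator_alt
  rw [runsOf_eq_rle]
  exact goA_eq_goB_rle s o
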